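-- pv_equiv track=rewrite | github.com/nickathens/MyOldMachine | core/session.py | _trim_tool_outputs
-- ===== SOURCE A (Python) =====
-- def _trim_tool_outputs(content: str) -> str:
--     """Remove verbose tool output blocks from content."""
--     result = content
--
--     # Trim long code blocks (>30 lines)
--     search_from = 0
--     while True:
--         start = result.find('```', search_from)
--         if start == -1:
--             break
--         end = result.find('```', start + 3)
--         if end == -1:
--             break
--         end += 3
--         block = result[start:end]
--         line_count = block.count('\n')
--         if line_count > 30:
--             first_line = block.split('\n')[0] if '\n' in block else block
--             if 'json' in first_line.lower():
--                 replacement = '[Large JSON response trimmed]'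
--             else:
--                 replacement = '[Long code block trimmed]'
--             result = result[:start] + replacement + result[end:]
--             search_from = start + len(replacement)
--         else:
--             search_from = end
--
--     # Trim consecutive log lines (10+)
--     lines = result.split('\n')
--     trimmed_lines = []
--     log_buffer = []
--     for line in lines:
--         is_log = len(line) > 10 and line[:4].isdigit() and line[4] == '-'
--         if is_log:
--             log_buffer.append(line)
--         else:
--             if len(log_buffer) >= 10:
--                 trimmed_lines.append('[Log output trimmed]')
--             else:
--                 trimmed_lines.extend(log_buffer)
--             log_buffer = []
--             trimmed_lines.append(line)
--     if len(log_buffer) >= 10: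
--         trimmed_lines.append('[Log output trimmed]')
--     else:
--         trimmed_lines.extend(log_buffer)
--
--     return '\n'.join(trimmed_lines)
-- ===== SOURCE B (Python) =====
-- def _is_log(line):
--     return len(line) > 10 and line[:4].isdigit() and line[4] == '-'
--
--
-- def _rebuild(parts):
--     # parts = content.split('```'); pair up the fence occurrences left to right
--     if len(parts) <= 1:
--         return parts[0] if parts else ''
--     if len(parts) == 2:
--         return parts[0] + '```' + parts[1]   # unpaired trailing fence
--     block = '```' + parts[1] + '```'
--     if block.count('\n') > 30:
--         first = block.split('\n')[0]
--         rep = '[Large JSON response trimmed]' if 'json' in first.lower() else '[Long code block trimmed]'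
--     else:
--         rep = block
--     return parts[0] + rep + _rebuild(parts[2:])
--
--
-- def _squash(lines):
--     if not lines:
--         return []
--     flag = _is_log(lines[0])
--     j = 0
--     while j < len(lines) and _is_log(lines[j]) == flag:
--         j += 1
--     rest = _squash(lines[j:])
--     if flag and j >= 10:
--         return ['[Log output trimmed]'] + rest
--     return lines[:j] + rest
--
--
-- def _trim_tool_outputs(content: str) -> str:
--     """Remove verbose tool output blocks from content."""
--     result = _rebuild(content.split('```'))
--     return '\n'.join(_squash(result.split('\n')))
-- ===== Notes on version B (the rewrite author's own statement) =====
-- stated objective: alternative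
-- what changed: Pass 1: instead of A's stateful find/search_from loop that splices replacements into the string and rescans it, B splits the content on '```' once and rebuilds it by recursion over the parts list, pairing fence occurrences structurally; pass 2: instead of A's line-by-line log-buffer accumulator with a final flush, B recursively splits the line list into maximal runs of equal is-log flag and emits each run (or the trim marker) whole.
import Mathlib
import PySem

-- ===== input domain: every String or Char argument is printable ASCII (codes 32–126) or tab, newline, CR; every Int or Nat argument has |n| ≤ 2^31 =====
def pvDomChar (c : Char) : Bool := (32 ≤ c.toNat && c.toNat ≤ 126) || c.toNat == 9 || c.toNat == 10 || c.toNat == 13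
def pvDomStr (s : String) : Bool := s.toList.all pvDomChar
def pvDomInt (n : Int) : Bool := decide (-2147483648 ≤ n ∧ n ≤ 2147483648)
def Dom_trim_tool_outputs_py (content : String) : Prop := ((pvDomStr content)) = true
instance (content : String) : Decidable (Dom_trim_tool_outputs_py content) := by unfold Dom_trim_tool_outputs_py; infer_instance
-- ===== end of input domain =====

-- B replaces A's in-place find/search_from rescanning loop by one split('```') plus a
-- structural reconstruction, and A's log-buffer accumulator by a run-splitting recursion
-- (takeWhile/dropWhile); same return value, alternative structure.

-- shared literal constants of both Python programs
def pvTicks : List Char := ['`', '`', '`']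
def pvNL : List Char := ['\n']
def pvMsgLog : List Char := "[Log output trimmed]".toList
def pvMsgJson : List Char := "[Large JSON response trimmed]".toList
def pvMsgCode : List Char := "[Long code block trimmed]".toList
-- the log-line predicate, literally `len(line) > 10 and line[:4].isdigit() and line[4] == '-'`
-- (identical expression in both Pythons)
def pvIsLog (line : List Char) : Bool :=
  decide (10 < line.length) && PySem.Chars.strIsdigit (PySem.List.slice line none (some 4))
    && (PySem.List.pyGet? line 4 == some '-')

-- ===== PORT A =====
-- the `while True` scan of A; `result`/`search_from` are the loop state (search_from is an
-- int ≥ 0 in Python, carried as Nat and cast at each use).  The loop is carried on a fuel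
-- counter for totality only: every iteration moves `search_from` past at least one fence,
-- so `result.length - search_from < fuel` is preserved and the 0-fuel arm is never reached
-- from the top-level call (this is part of what pvALoop_eq proves).
def pvALoop : Nat → List Char → Nat → List Char
  | 0, result, _ => result
  | fuel + 1, result, sf =>
    let start := PySem.Chars.findFrom result pvTicks (sf : Int) none
    if start = -1 then result
    else
      let endf := PySem.Chars.findFrom result pvTicks (start + 3) none
      if endf = -1 then result
      else
        let e := endf + 3
        let block := PySem.List.slice result (some start) (some e)
        if 30 < PySem.Chars.count block pvNL then
          -- first_line = block.split('\n')[0] if '\n' in block else block  ([0] exists: split is never empty)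
          let first_line := if PySem.Chars.isIn pvNL block then (PySem.Chars.splitOn block pvNL).headD [] else block
          let repl := if PySem.Chars.isIn "json".toList (PySem.Chars.lower first_line) then pvMsgJson else pvMsgCode
          pvALoop fuel (PySem.List.slice result none (some start) ++ repl ++ PySem.List.slice result (some e) none)
            (start.toNat + repl.length)
        else pvALoop fuel result e.toNat

-- the second pass of A: for-loop with `trimmed_lines`/`log_buffer` accumulators, then the final flush
def pvALoop2 (trimmed buf : List (List Char)) : List (List Char) → List (List Char)
  | [] => if 10 ≤ buf.length then trimmed ++ [pvMsgLog] else trimmed ++ buf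
  | l :: ls =>
      if pvIsLog l then pvALoop2 trimmed (buf ++ [l]) ls
      else pvALoop2 ((if 10 ≤ buf.length then trimmed ++ [pvMsgLog] else trimmed ++ buf) ++ [l]) [] ls

def trim_tool_outputs_py (content : String) : String :=
  let result := pvALoop (content.toList.length + 1) content.toList 0
  String.ofList (PySem.Chars.join pvNL (pvALoop2 [] [] (PySem.Chars.splitOn result pvNL)))

-- ===== PORT B =====
-- _rebuild(parts): pair the fence occurrences of content.split('```') left to right
def pvRebuild : List (List Char) → List Char
  | [] => []
  | [p] => p
  | [p, q] => p ++ pvTicks ++ q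
  | p :: q :: r :: rest =>
      let block := pvTicks ++ q ++ pvTicks
      let rep :=
        if 30 < PySem.Chars.count block pvNL then
          if PySem.Chars.isIn "json".toList (PySem.Chars.lower ((PySem.Chars.splitOn block pvNL).headD []))
          then pvMsgJson else pvMsgCode
        else block
      p ++ rep ++ pvRebuild (r :: rest)

-- _squash(lines): the `j`-scan of Source B computes exactly the takeWhile/dropWhile split of the
-- leading run of equal _is_log flag
def pvSquash : List (List Char) → List (List Char)
  | [] => []
  | l :: ls =>
      let flag := pvIsLog l
      let run := (l :: ls).takeWhile (fun x => pvIsLog x == flag)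
      let rest := pvSquash ((l :: ls).dropWhile (fun x => pvIsLog x == flag))
      if flag && decide (10 ≤ run.length) then pvMsgLog :: rest else run ++ rest
  termination_by ls => ls.length
  decreasing_by
    simp only [List.dropWhile_cons, beq_self_eq_true, if_pos]
    exact Nat.lt_succ_of_le (List.length_dropWhile_le _ _)

def trim_tool_outputs_py_alt (content : String) : String :=
  let result := pvRebuild (PySem.Chars.splitOn content.toList pvTicks)
  String.ofList (PySem.Chars.join pvNL (pvSquash (PySem.Chars.splitOn result pvNL)))

-- ===== PRECONDITION & SPEC =====
def Spec_trim_tool_outputs_py (content : String) (out : String) : Prop := out = trim_tool_outputs_py_alt content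
instance (content : String) (out : String) : Decidable (Spec_trim_tool_outputs_py content out) := by unfold Spec_trim_tool_outputs_py; infer_instance

-- ===== CLAIM (what is proved, stated in full; the proofs are below) =====
def Claim_equal_trim_tool_outputs_py : Prop := ∀ (content : String), Dom_trim_tool_outputs_py content → Spec_trim_tool_outputs_py content (trim_tool_outputs_py content)

-- ===== LEMMAS AND PROOFS =====

-- ---- splitOn characterization (PySem.Chars.splitOn has no public equations) ----

theorem pvGo_fuel_irrel (sep : List Char) (hsep : sep ≠ []) :
    ∀ (l : List Char) (f g : Nat) (cur : List Char) (acc : List (List Char)),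
      l.length ≤ f → l.length ≤ g →
      PySem.Chars.splitOn.go sep f l cur acc = PySem.Chars.splitOn.go sep g l cur acc := by
  intro l
  induction hn : l.length using Nat.strong_induction_on generalizing l with
  | _ n IH =>
  subst hn
  intro f g cur acc hf hg
  cases l with
  | nil => cases f <;> cases g <;> simp [PySem.Chars.splitOn.go]
  | cons c rest =>
    have hslen : 0 < sep.length := List.length_pos_iff.mpr hsep
    cases f with
    | zero => simp at hf
    | succ f =>
      cases g with
      | zero => simp at hg
      | succ g =>
        by_cases hp : sep.isPrefixOf (c :: rest) = true
        · rw [PySem.Chars.splitOn.go, PySem.Chars.splitOn.go]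
          simp only [hp, if_pos]
          have hlen : sep.length ≤ (c :: rest).length := (List.isPrefixOf_iff_prefix.mp hp).length_le
          apply IH (List.drop sep.length (c :: rest)).length
            (by simp [List.length_drop]; omega) _ rfl
          · simp [List.length_drop]; simp at hf; omega
          · simp [List.length_drop]; simp at hg; omega
        · rw [PySem.Chars.splitOn.go, PySem.Chars.splitOn.go]
          simp only [hp]
          apply IH rest.length (by simp) _ rfl
          · simp at hf; omega
          · simp at hg; omega

theorem pvGo_acc (sep : List Char) (hsep : sep ≠ []) :
    ∀ (l : List Char) (f : Nat) (cur : List Char) (acc : List (List Char)),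
      l.length ≤ f →
      PySem.Chars.splitOn.go sep f l cur acc
        = acc.reverse ++ (PySem.Chars.splitOn.go sep f l [] []).modifyHead (cur.reverse ++ ·) := by
  intro l
  induction hn : l.length using Nat.strong_induction_on generalizing l with
  | _ n IH =>
  subst hn
  intro f cur acc hf
  cases l with
  | nil =>
    cases f <;> simp [PySem.Chars.splitOn.go]
  | cons c rest =>
    have hslen : 0 < sep.length := List.length_pos_iff.mpr hsep
    cases f with
    | zero => simp at hf
    | succ f =>
      by_cases hp : sep.isPrefixOf (c :: rest) = true
      · rw [PySem.Chars.splitOn.go, PySem.Chars.splitOn.go]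
        simp only [hp, if_pos]
        have hlen : sep.length ≤ (c :: rest).length := (List.isPrefixOf_iff_prefix.mp hp).length_le
        have hd : (List.drop sep.length (c :: rest)).length ≤ f := by
          simp [List.length_drop]; simp at hf; omega
        rw [IH (List.drop sep.length (c :: rest)).length (by simp [List.length_drop]; omega)
              _ rfl f _ _ hd]
        conv_rhs => rw [IH (List.drop sep.length (c :: rest)).length (by simp [List.length_drop]; omega)
              _ rfl f [] [[].reverse] hd]
        cases hG : PySem.Chars.splitOn.go sep f (List.drop sep.length (c :: rest)) [] [] <;> simp
      · rw [PySem.Chars.splitOn.go, PySem.Chars.splitOn.go]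
        simp only [hp]
        have hr : rest.length ≤ f := by simp at hf; omega
        rw [IH rest.length (by simp) _ rfl f _ _ hr]
        conv_rhs => rw [IH rest.length (by simp) _ rfl f [c] [] hr]
        cases hG : PySem.Chars.splitOn.go sep f rest [] [] <;> simp

theorem pvSplitOn_nil (sep : List Char) : PySem.Chars.splitOn [] sep = [[]] := by
  simp [PySem.Chars.splitOn, PySem.Chars.splitOn.go]

theorem pvSplitOn_cons_prefix {sep l : List Char} (hsep : sep ≠ []) (h : sep <+: l) :
    PySem.Chars.splitOn l sep = [] :: PySem.Chars.splitOn (l.drop sep.length) sep := by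
  have hslen : 0 < sep.length := List.length_pos_iff.mpr hsep
  have hll : 0 < l.length := by have := h.length_le; omega
  obtain ⟨c, rest, rfl⟩ := List.exists_cons_of_ne_nil (List.ne_nil_of_length_pos hll)
  have hp : sep.isPrefixOf (c :: rest) = true := List.isPrefixOf_iff_prefix.mpr h
  have hdl : ((c :: rest).drop sep.length).length ≤ (c :: rest).length := by
    simp only [List.length_drop]; omega
  unfold PySem.Chars.splitOn
  rw [PySem.Chars.splitOn.go]
  simp only [hp, if_pos]
  rw [pvGo_acc sep hsep _ _ _ _ hdl]
  rw [pvGo_fuel_irrel sep hsep ((c :: rest).drop sep.length) ((c :: rest).length)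
        (((c :: rest).drop sep.length).length + 1) [] [] hdl (by omega)]
  cases hG : PySem.Chars.splitOn.go sep (((c :: rest).drop sep.length).length + 1)
      ((c :: rest).drop sep.length) [] [] <;> simp

theorem pvSplitOn_cons_not_prefix {sep : List Char} {c : Char} {rest : List Char}
    (h : ¬ sep <+: (c :: rest)) :
    PySem.Chars.splitOn (c :: rest) sep = (PySem.Chars.splitOn rest sep).modifyHead (c :: ·) := by
  have hsep : sep ≠ [] := by rintro rfl; exact h (List.nil_prefix)
  have hp : ¬ sep.isPrefixOf (c :: rest) = true := fun hh => h (List.isPrefixOf_iff_prefix.mp hh)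
  unfold PySem.Chars.splitOn
  rw [PySem.Chars.splitOn.go]
  simp only [hp]
  rw [pvGo_acc sep hsep rest _ [c] [] (by simp)]
  rw [pvGo_fuel_irrel sep hsep rest ((c :: rest).length) (rest.length + 1) [] [] (by simp) (by omega)]
  cases hG : PySem.Chars.splitOn.go sep (rest.length + 1) rest [] [] <;> simp

theorem pvSplitOn_ne_nil (sep s : List Char) (hsep : sep ≠ []) : PySem.Chars.splitOn s sep ≠ [] := by
  induction s with
  | nil => simp [pvSplitOn_nil]
  | cons c rest IH =>
    by_cases h : sep <+: (c :: rest)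
    · rw [pvSplitOn_cons_prefix hsep h]; simp
    · rw [pvSplitOn_cons_not_prefix h]
      cases hG : PySem.Chars.splitOn rest sep
      · exact absurd hG IH
      · simp

theorem pvSplitOn_no_infix {sep s : List Char} (hsep : sep ≠ []) (h : ¬ sep <:+: s) :
    PySem.Chars.splitOn s sep = [s] := by
  induction s with
  | nil => exact pvSplitOn_nil sep
  | cons c rest IH =>
    have hnp : ¬ sep <+: (c :: rest) := fun hh => h hh.isInfix
    rw [pvSplitOn_cons_not_prefix hnp]
    rw [IH (fun hh => h (hh.trans (List.suffix_cons c rest).isInfix))]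
    rfl

theorem pvSplitOn_found {sep : List Char} (hsep : sep ≠ []) :
    ∀ (i : Nat) (s : List Char), (∀ m, m < i → ¬ sep <+: s.drop m) → sep <+: s.drop i →
      PySem.Chars.splitOn s sep = s.take i :: PySem.Chars.splitOn (s.drop (i + sep.length)) sep := by
  intro i
  induction i with
  | zero =>
    intro s _ h2
    simpa using pvSplitOn_cons_prefix hsep (by simpa using h2)
  | succ i IH =>
    intro s h1 h2
    have hs : s ≠ [] := by
      intro rfl_; subst rfl_; simp at h2; exact hsep h2
    obtain ⟨c, rest, rfl⟩ := List.exists_cons_of_ne_nil hs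
    have hnp : ¬ sep <+: (c :: rest) := by simpa using h1 0 (Nat.succ_pos _)
    rw [pvSplitOn_cons_not_prefix hnp]
    rw [IH rest (fun m hm => by simpa using h1 (m + 1) (by omega)) (by simpa using h2)]
    have harith : i + 1 + sep.length = (i + sep.length) + 1 := by omega
    rw [harith]
    simp [List.take_succ_cons, List.drop_succ_cons]

-- ---- pass 1: the scanning loop equals take-prefix ++ rebuild of the split ----

theorem pvScanFacts (result : List Char) (sf : Nat) (h : sf ≤ result.length)
    (hs : PySem.Chars.findFrom result pvTicks (sf : Int) none ≠ -1) :
    ∃ i : Nat, PySem.Chars.findFrom result pvTicks (sf : Int) none = (i : Int) ∧ sf ≤ i ∧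
      i + 3 ≤ result.length ∧ pvTicks <+: result.drop i ∧
      (∀ m, sf ≤ m → m < i → ¬ pvTicks <+: result.drop m) := by
  obtain ⟨hle, hpre, hmin⟩ := PySem.Chars.findFrom_natCast_spec result pvTicks sf h hs
  have h0 : (0 : Int) ≤ PySem.Chars.findFrom result pvTicks (sf : Int) none :=
    le_trans (Int.natCast_nonneg sf) hle
  refine ⟨(PySem.Chars.findFrom result pvTicks (sf : Int) none).toNat,
    (Int.toNat_of_nonneg h0).symm, by omega, ?_, hpre, hmin⟩
  have := hpre.length_le
  rw [show pvTicks.length = 3 from rfl, List.length_drop] at this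
  omega

theorem pvDrop_decomp {result : List Char} {i : Nat} (hpre : pvTicks <+: result.drop i) :
    result.drop i = pvTicks ++ result.drop (i + 3) := by
  obtain ⟨t, ht⟩ := hpre
  have h3 : result.drop (i + 3) = t := by
    have : (result.drop i).drop 3 = t := by rw [← ht]; simp [pvTicks]
    rw [← this, List.drop_drop]
  rw [h3, ht]

theorem pvTake_join (result : List Char) {sf i : Nat} (hsf : sf ≤ i) :
    result.take sf ++ (result.drop sf).take (i - sf) = result.take i := by
  rw [show i = sf + (i - sf) by omega, List.take_add]
  congr 2
  omega

theorem pvSplit_step {result : List Char} {sf i : Nat} (hsf : sf ≤ i)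
    (hpre : pvTicks <+: result.drop i)
    (hmin : ∀ m, sf ≤ m → m < i → ¬ pvTicks <+: result.drop m) :
    PySem.Chars.splitOn (result.drop sf) pvTicks
      = (result.drop sf).take (i - sf) :: PySem.Chars.splitOn (result.drop (i + 3)) pvTicks := by
  have h1 : ∀ m, m < i - sf → ¬ pvTicks <+: (result.drop sf).drop m := by
    intro m hm
    rw [List.drop_drop]
    exact hmin (sf + m) (by omega) (by omega)
  have h2 : pvTicks <+: (result.drop sf).drop (i - sf) := by
    rw [List.drop_drop, show sf + (i - sf) = i by omega]
    exact hpre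
  have := pvSplitOn_found (by decide : pvTicks ≠ []) (i - sf) (result.drop sf) h1 h2
  rw [this, List.drop_drop, show sf + (i - sf + pvTicks.length) = i + 3 by
    rw [show pvTicks.length = 3 from rfl]; omega]

theorem pvBlock_decomp {result : List Char} {i k : Nat} (hik : i + 3 ≤ k)
    (hpre1 : pvTicks <+: result.drop i) (hpre2 : pvTicks <+: result.drop k) :
    (result.drop i).take (k + 3 - i)
      = pvTicks ++ (result.drop (i + 3)).take (k - (i + 3)) ++ pvTicks := by
  rw [pvDrop_decomp hpre1, List.take_append]
  rw [show pvTicks.length = 3 from rfl]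
  rw [List.take_of_length_le (by rw [show pvTicks.length = 3 from rfl]; omega)]
  rw [show k + 3 - i - 3 = (k - (i + 3)) + 3 by omega, List.take_add]
  rw [List.drop_drop, show i + 3 + (k - (i + 3)) = k by omega]
  have h3 : (result.drop k).take 3 = pvTicks := by
    obtain ⟨t, ht⟩ := hpre2
    rw [← ht]; simp [pvTicks]
  rw [h3, List.append_assoc]

theorem pvALoop_eq : ∀ (fuel : Nat) (result : List Char) (sf : Nat),
    result.length - sf < fuel → sf ≤ result.length →
    pvALoop fuel result sf
      = result.take sf ++ pvRebuild (PySem.Chars.splitOn (result.drop sf) pvTicks) := by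
  intro fuel
  induction fuel with
  | zero => intro result sf hf h; omega
  | succ fuel IH =>
    intro result sf hf h
    simp only [pvALoop]
    by_cases hs : PySem.Chars.findFrom result pvTicks (sf : Int) none = -1
    · rw [if_pos hs]
      have hninf : ¬ pvTicks <:+: result.drop sf :=
        (PySem.Chars.findFrom_natCast_eq_neg_one_iff result pvTicks sf h).mp hs
      rw [pvSplitOn_no_infix (by decide) hninf]
      simp [pvRebuild]
    · rw [if_neg hs]
      obtain ⟨i, hi, hsfi, hi3, hpre1, hmin1⟩ := pvScanFacts result sf h hs
      have harg : ((i + 3 : Nat) : Int) = PySem.Chars.findFrom result pvTicks (sf : Int) none + 3 := by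
        rw [hi]; push_cast; ring
      by_cases he : PySem.Chars.findFrom result pvTicks
          (PySem.Chars.findFrom result pvTicks (sf : Int) none + 3) none = -1
      · rw [if_pos he]
        have he' : PySem.Chars.findFrom result pvTicks ((i + 3 : Nat) : Int) none = -1 := by
          rw [harg]; exact he
        have hninf : ¬ pvTicks <:+: result.drop (i + 3) :=
          (PySem.Chars.findFrom_natCast_eq_neg_one_iff result pvTicks (i + 3) hi3).mp he'
        rw [pvSplit_step hsfi hpre1 hmin1, pvSplitOn_no_infix (by decide) hninf]
        show result = _
        rw [show pvRebuild [(result.drop sf).take (i - sf), result.drop (i + 3)]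
              = (result.drop sf).take (i - sf) ++ pvTicks ++ result.drop (i + 3) from rfl]
        rw [← List.append_assoc, ← List.append_assoc, pvTake_join result hsfi, List.append_assoc,
            ← pvDrop_decomp hpre1, List.take_append_drop]
      · rw [if_neg he]
        have he2 : PySem.Chars.findFrom result pvTicks ((i + 3 : Nat) : Int) none ≠ -1 := by
          rw [harg]; exact he
        obtain ⟨k, hk, hik, hk3, hpre2, hmin2⟩ := pvScanFacts result (i + 3) hi3 he2
        have he3 : PySem.Chars.findFrom result pvTicks
              (PySem.Chars.findFrom result pvTicks (sf : Int) none + 3) none + 3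
            = ((k + 3 : Nat) : Int) := by
          rw [← harg, hk]; push_cast; ring
        have hblock : PySem.List.slice result
              (some (PySem.Chars.findFrom result pvTicks (sf : Int) none))
              (some (PySem.Chars.findFrom result pvTicks
                (PySem.Chars.findFrom result pvTicks (sf : Int) none + 3) none + 3))
            = pvTicks ++ (result.drop (i + 3)).take (k - (i + 3)) ++ pvTicks := by
          rw [he3, hi, PySem.List.slice_natCast]
          exact pvBlock_decomp hik hpre1 hpre2
        rw [hblock, he3, hi]
        simp only [Int.toNat_natCast, PySem.List.slice_to_natCast, PySem.List.slice_from_natCast]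
        have hs1 := pvSplit_step hsfi hpre1 hmin1
        have hs2 := pvSplit_step hik hpre2 hmin2
        obtain ⟨R, REST, hRR⟩ :=
          List.exists_cons_of_ne_nil (pvSplitOn_ne_nil pvTicks (result.drop (k + 3)) (by decide))
        rw [hs1, hs2, hRR]
        simp only [pvRebuild]
        rw [← hRR]
        -- A's first_line expression equals Source B's unconditional split head
        have hfl : (if PySem.Chars.isIn pvNL
              (pvTicks ++ (result.drop (i + 3)).take (k - (i + 3)) ++ pvTicks) then
                (PySem.Chars.splitOn
                  (pvTicks ++ (result.drop (i + 3)).take (k - (i + 3)) ++ pvTicks) pvNL).headD []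
              else pvTicks ++ (result.drop (i + 3)).take (k - (i + 3)) ++ pvTicks)
            = (PySem.Chars.splitOn
                (pvTicks ++ (result.drop (i + 3)).take (k - (i + 3)) ++ pvTicks) pvNL).headD [] := by
          by_cases hin : PySem.Chars.isIn pvNL
              (pvTicks ++ (result.drop (i + 3)).take (k - (i + 3)) ++ pvTicks) = true
          · rw [if_pos hin]
          · rw [if_neg hin, pvSplitOn_no_infix (by decide)
              (fun hinf => hin ((PySem.Chars.isIn_iff_infix _ _).mpr hinf))]
            rfl
        rw [hfl]
        by_cases hcnt : 30 < PySem.Chars.count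
            (pvTicks ++ (result.drop (i + 3)).take (k - (i + 3)) ++ pvTicks) pvNL
        · rw [if_pos hcnt, if_pos hcnt]
          have hlen : (result.take i ++ (if PySem.Chars.isIn "json".toList (PySem.Chars.lower
                ((PySem.Chars.splitOn (pvTicks ++ (result.drop (i + 3)).take (k - (i + 3)) ++ pvTicks)
                  pvNL).headD [])) then pvMsgJson else pvMsgCode) ++ result.drop (k + 3)).length
              = i + (if PySem.Chars.isIn "json".toList (PySem.Chars.lower
                ((PySem.Chars.splitOn (pvTicks ++ (result.drop (i + 3)).take (k - (i + 3)) ++ pvTicks)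
                  pvNL).headD [])) then pvMsgJson else pvMsgCode).length + (result.length - (k + 3)) := by
            simp only [List.length_append, List.length_take, List.length_drop]
            omega
          rw [IH _ _ (by rw [hlen]; omega) (by rw [hlen]; omega)]
          rw [List.take_left' (by simp only [List.length_append, List.length_take]; omega),
              List.drop_left' (by simp only [List.length_append, List.length_take]; omega)]
          rw [show result.take i = result.take sf ++ (result.drop sf).take (i - sf) from
            (pvTake_join result hsfi).symm]
          simp [List.append_assoc]
        · rw [if_neg hcnt, if_neg hcnt]
          rw [IH _ _ (by omega) (by omega)]
          have htk : result.take (k + 3)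
              = result.take sf ++ (result.drop sf).take (i - sf)
                ++ (pvTicks ++ (result.drop (i + 3)).take (k - (i + 3)) ++ pvTicks) := by
            rw [pvTake_join result hsfi, ← pvBlock_decomp hik hpre1 hpre2]
            conv_lhs => rw [show k + 3 = i + (k + 3 - i) by omega]
            rw [List.take_add]
          rw [htk]
          simp [List.append_assoc]

-- ---- pass 2: the buffer loop equals the run-splitting recursion ----

def pvEmit (run : List (List Char)) : List (List Char) :=
  if 10 ≤ run.length then [pvMsgLog] else run

theorem pvSquash_false_run (ls : List (List Char)) :
    pvSquash ls = ls.takeWhile (fun x => !pvIsLog x)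
      ++ pvSquash (ls.dropWhile (fun x => !pvIsLog x)) := by
  cases ls with
  | nil => simp [pvSquash]
  | cons x xs =>
    by_cases hx : pvIsLog x = true
    · simp [List.takeWhile_cons, List.dropWhile_cons, hx]
    · rw [pvSquash]
      simp only [Bool.not_eq_true] at hx
      simp [hx]

theorem pvSquash_cons_not_log {l : List Char} {ls : List (List Char)} (h : pvIsLog l = false) :
    pvSquash (l :: ls) = l :: pvSquash ls := by
  rw [pvSquash]
  simp only [h]
  simp [List.takeWhile_cons, List.dropWhile_cons, h]
  exact (pvSquash_false_run ls).symm

theorem pvSquash_log_head (ls : List (List Char))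
    (h : ls = [] ∨ ∃ x xs, ls = x :: xs ∧ pvIsLog x = true) :
    pvSquash ls = pvEmit (ls.takeWhile pvIsLog) ++ pvSquash (ls.dropWhile pvIsLog) := by
  rcases h with rfl | ⟨x, xs, rfl, hx⟩
  · simp [pvSquash, pvEmit]
  · rw [pvSquash]
    simp only [hx]
    have hpred : (fun y => pvIsLog y == true) = pvIsLog := by
      funext y; simp
    simp only [hpred, pvEmit]
    simp [List.takeWhile_cons, List.dropWhile_cons, hx]
    split_ifs <;> simp

theorem pvALoop2_eq (ls : List (List Char)) :
    ∀ (trimmed buf : List (List Char)), (∀ l ∈ buf, pvIsLog l = true) →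
      pvALoop2 trimmed buf ls
        = trimmed ++ pvEmit (buf ++ ls.takeWhile pvIsLog) ++ pvSquash (ls.dropWhile pvIsLog) := by
  induction ls with
  | nil =>
    intro trimmed buf _
    simp only [pvALoop2, List.takeWhile_nil, List.dropWhile_nil, List.append_nil, pvEmit]
    by_cases h10 : 10 ≤ buf.length <;> simp [h10, pvSquash]
  | cons l ls IH =>
    intro trimmed buf hbuf
    by_cases hl : pvIsLog l = true
    · rw [pvALoop2]
      simp only [hl, if_pos]
      rw [IH trimmed (buf ++ [l]) (by
        intro x hx
        rcases List.mem_append.mp hx with h | h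
        · exact hbuf x h
        · simp at h; subst h; exact hl)]
      simp [List.takeWhile_cons, List.dropWhile_cons, hl, List.append_assoc]
    · rw [pvALoop2]
      simp only [hl, Bool.false_eq_true, if_false]
      rw [IH _ [] (by intro x hx; simp at hx)]
      simp only [Bool.not_eq_true] at hl
      simp only [List.takeWhile_cons, List.dropWhile_cons, hl, Bool.false_eq_true, if_false,
        List.append_nil]
      have hflush : (if 10 ≤ buf.length then trimmed ++ [pvMsgLog] else trimmed ++ buf)
          = trimmed ++ pvEmit buf := by
        unfold pvEmit; split_ifs <;> simp
      rw [hflush]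
      rw [pvSquash_cons_not_log hl]
      have : pvSquash ls = pvEmit ([] ++ ls.takeWhile pvIsLog) ++ pvSquash (ls.dropWhile pvIsLog) := by
        simp only [List.nil_append]
        cases ls with
        | nil => simp [pvSquash, pvEmit]
        | cons y ys =>
          by_cases hy : pvIsLog y = true
          · exact pvSquash_log_head _ (Or.inr ⟨y, ys, rfl, hy⟩)
          · simp only [Bool.not_eq_true] at hy
            simp [List.takeWhile_cons, List.dropWhile_cons, hy, pvEmit,
              pvSquash_cons_not_log hy]
      rw [this]
      simp

theorem pvALoop2_eq_squash (ls : List (List Char)) : pvALoop2 [] [] ls = pvSquash ls := by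
  rw [pvALoop2_eq ls [] [] (by intro x hx; simp at hx)]
  simp only [List.nil_append]
  cases ls with
  | nil => simp [pvSquash, pvEmit]
  | cons y ys =>
    by_cases hy : pvIsLog y = true
    · exact (pvSquash_log_head _ (Or.inr ⟨y, ys, rfl, hy⟩)).symm
    · simp only [Bool.not_eq_true] at hy
      simp [List.takeWhile_cons, List.dropWhile_cons, hy, pvEmit, pvSquash_cons_not_log hy]

-- ===== VERDICT (by name: the statement is the Claim_ definition above) =====
theorem trim_tool_outputs_py_spec : Claim_equal_trim_tool_outputs_py := by
  intro content _
  unfold Spec_trim_tool_outputs_py trim_tool_outputs_py trim_tool_outputs_py_alt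
  have h1 := pvALoop_eq (content.toList.length + 1) content.toList 0 (by omega) (Nat.zero_le _)
  simp only [List.take_zero, List.drop_zero, List.nil_append] at h1
  simp only [h1, pvALoop2_eq_squash]
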